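-- pv_equiv track=rewrite | github.com/motet-a/imath | tools/mkdoc.py | typeset
-- ===== SOURCE A (Python) =====
-- def typeset(text):
--     """Renders text with verbatim sections into markdown."""
--     lines = []
--     fence = False
--     for line in text.split('\n'):
--         if fence != line.startswith(' '):
--             lines.append('```')
--             fence = not fence
--         lines.append(line)
--     if fence:
--         lines.append('```')
--     for i, line in enumerate(lines):
--         if i == 0: lines[i] = ' -  ' + line
--         elif line: lines[i] = '    ' + line
--     return '\n'.join(lines)
-- ===== SOURCE B (Python) =====
-- def typeset(text):
--     """Renders text with verbatim sections into markdown."""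
--     raw = text.split('\n')
--     out = []
--     i, n = 0, len(raw)
--     while i < n:
--         if raw[i].startswith(' '):
--             j = i
--             while j < n and raw[j].startswith(' '):
--                 j += 1
--             out.append('```')
--             out.extend(raw[i:j])
--             out.append('```')
--             i = j
--         else:
--             out.append(raw[i])
--             i += 1
--     head, *rest = out
--     return '\n'.join([' -  ' + head] + ['    ' + l if l else l for l in rest])
-- ===== Notes on version B (the rewrite author's own statement) =====
-- stated objective: alternative
-- what changed: Replaces A's fence-toggle state machine and the enumerate-based in-place prefix loop by run-based grouping (each maximal run of space-indented lines is wrapped in a '```' pair outright, so no fence flag exists) and a head/tail destructuring prefix pass.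
import Mathlib
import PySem

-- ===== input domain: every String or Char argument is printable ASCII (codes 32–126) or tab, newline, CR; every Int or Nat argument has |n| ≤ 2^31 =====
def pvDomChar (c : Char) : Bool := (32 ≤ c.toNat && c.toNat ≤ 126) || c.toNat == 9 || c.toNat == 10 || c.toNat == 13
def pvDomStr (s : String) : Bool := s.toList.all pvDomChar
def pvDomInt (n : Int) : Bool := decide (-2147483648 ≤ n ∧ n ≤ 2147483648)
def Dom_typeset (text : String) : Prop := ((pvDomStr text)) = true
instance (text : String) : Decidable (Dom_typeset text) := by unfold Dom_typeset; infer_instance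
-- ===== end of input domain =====

-- B wraps each maximal run of space-indented lines in a '```' pair directly (no fence flag)
-- and applies the prefixes by head/tail destructuring instead of A's enumerate loop; same cost.

-- ===== PORT A =====
-- the '```' line
def pvFence : List Char := ['`', '`', '`']

-- A's loop body: toggle the fence (emitting '```') when indentation state changes, then emit the line
def pvStepA (st : List (List Char) × Bool) (line : List Char) : List (List Char) × Bool :=
  let st' := if st.2 != PySem.Chars.startswith line [' '] then (st.1 ++ [pvFence], !st.2) else st
  (st'.1 ++ [line], st'.2)

def typeset (text : String) : String :=
  let st := (PySem.Chars.splitOn text.toList ['\n']).foldl pvStepA ([], false)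
  let lines := if st.2 then st.1 ++ [pvFence] else st.1
  let lines2 := (PySem.List.enumerate lines).map (fun il =>
    if il.1 = 0 then ' ' :: '-' :: ' ' :: ' ' :: il.2
    else if il.2 ≠ [] then ' ' :: ' ' :: ' ' :: ' ' :: il.2
    else il.2)
  String.ofList (PySem.Chars.join ['\n'] lines2)

-- ===== PORT B =====
-- Source B's grouping pass: a maximal run of space-indented lines becomes '```', run, '```'
def pvGroups : List (List Char) → List (List Char)
  | [] => []
  | l :: ls =>
    if PySem.Chars.startswith l [' '] then
      let sp := ls.span (fun x => PySem.Chars.startswith x [' '])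
      pvFence :: l :: (sp.1 ++ pvFence :: pvGroups sp.2)
    else l :: pvGroups ls
termination_by ls => ls.length
decreasing_by
  · simpa [List.span_eq_takeWhile_dropWhile] using
      Nat.lt_succ_of_le (ls.length_dropWhile_le _)
  · exact Nat.lt_succ_self _

def typeset_alt (text : String) : String :=
  match pvGroups (PySem.Chars.splitOn text.toList ['\n']) with
  | [] => ""  -- unreachable: split('\n') always yields at least one line
  | h :: t =>
    String.ofList (PySem.Chars.join ['\n']
      ((' ' :: '-' :: ' ' :: ' ' :: h) ::
        t.map (fun l => if l ≠ [] then ' ' :: ' ' :: ' ' :: ' ' :: l else l)))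

-- ===== PRECONDITION & SPEC =====
def Spec_typeset (text : String) (out : String) : Prop := out = typeset_alt text
instance (text : String) (out : String) : Decidable (Spec_typeset text out) := by unfold Spec_typeset; infer_instance

-- ===== CLAIM (what is proved, stated in full; the proofs are below) =====
def Claim_equal_typeset : Prop := ∀ (text : String), Dom_typeset text → Spec_typeset text (typeset text)

-- ===== LEMMAS AND PROOFS =====

-- what remains to be emitted by A's loop from fence state `fence`
def pvATail : List (List Char) → Bool → List (List Char)
  | [], fence => if fence then [pvFence] else []
  | l :: ls, fence =>
    if fence != PySem.Chars.startswith l [' '] then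
      pvFence :: l :: pvATail ls (!fence)
    else l :: pvATail ls fence

theorem pvFold_eq_aTail (ls : List (List Char)) :
    ∀ (acc : List (List Char)) (fence : Bool),
    (if (ls.foldl pvStepA (acc, fence)).2 then (ls.foldl pvStepA (acc, fence)).1 ++ [pvFence]
     else (ls.foldl pvStepA (acc, fence)).1) = acc ++ pvATail ls fence := by
  induction ls with
  | nil => intro acc fence; cases fence <;> simp [pvATail]
  | cons l ls ih =>
    intro acc fence
    by_cases h : fence != PySem.Chars.startswith l [' '] <;>
      simp only [List.foldl_cons, pvStepA, h, if_true] <;>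
      simp [ih, pvATail, h]

theorem pvATail_eq_groups (ls : List (List Char)) :
    pvATail ls false = pvGroups ls ∧
    pvATail ls true =
      ls.takeWhile (fun x => PySem.Chars.startswith x [' ']) ++
        pvFence :: pvGroups (ls.dropWhile (fun x => PySem.Chars.startswith x [' '])) := by
  induction ls with
  | nil => simp [pvATail, pvGroups]
  | cons l ls ih =>
    by_cases h : PySem.Chars.startswith l [' '] <;>
      constructor <;>
      simp [pvATail, pvGroups, h, ih.1, ih.2, List.span_eq_takeWhile_dropWhile]

theorem pvEnum_map_tail (t : List (List Char)) :
    ∀ s : Int, 1 ≤ s →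
    (PySem.List.enumerate t s).map (fun il =>
      if il.1 = 0 then ' ' :: '-' :: ' ' :: ' ' :: il.2
      else if il.2 ≠ [] then ' ' :: ' ' :: ' ' :: ' ' :: il.2
      else il.2) =
    t.map (fun l => if l ≠ [] then ' ' :: ' ' :: ' ' :: ' ' :: l else l) := by
  induction t with
  | nil => intro s _; simp [PySem.List.enumerate_nil]
  | cons l t ih =>
    intro s hs
    rw [PySem.List.enumerate_cons]
    simp only [List.map_cons, ih (s + 1) (by omega)]
    have : ¬ s = 0 := by omega
    simp [this]

-- ===== VERDICT (by name: the statement is the Claim_ definition above) =====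
theorem typeset_spec : Claim_equal_typeset := by
  intro text _
  unfold Spec_typeset
  show typeset text = typeset_alt text
  unfold typeset typeset_alt
  simp only []
  rw [pvFold_eq_aTail]
  simp only [(pvATail_eq_groups _).1, List.nil_append]
  rcases hg : pvGroups (PySem.Chars.splitOn text.toList ['\n']) with _ | ⟨h, t⟩
  · simp [PySem.List.enumerate_nil, PySem.Chars.join, List.intercalate]
  · rw [PySem.List.enumerate_cons]
    simp only [List.map_cons]
    rw [pvEnum_map_tail t (0 + 1) (by omega)]
    simp
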